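-- pv_equiv track=rewrite | github.com/kmk142789/kmk142789 | scripts/dala_lex_ingest.py | infer_domains
-- ===== SOURCE A (Python) =====
-- DOMAINS = {
--     "governance": "Governance & Oversight",
--     "fiduciary": "Fiduciary Duties & Financial Integrity",
--     "privacy": "Data Protection & Privacy Operations",
--     "cross-border": "Cross-Border & Jurisdictional Alignment",
-- }
--
-- def infer_domains(text: str) -> list[str]:
--     lower_text = text.lower()
--     mapping = {
--         "governance": DOMAINS["governance"],
--         "board": DOMAINS["governance"],
--         "fiduciary": DOMAINS["fiduciary"],
--         "treasury": DOMAINS["fiduciary"],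
--         "capital": DOMAINS["fiduciary"],
--         "privacy": DOMAINS["privacy"],
--         "data": DOMAINS["privacy"],
--         "gdpr": DOMAINS["privacy"],
--         "cross-border": DOMAINS["cross-border"],
--         "international": DOMAINS["cross-border"],
--         "sanctions": DOMAINS["cross-border"],
--         "jurisdiction": DOMAINS["cross-border"],
--     }
--     domains = []
--     for keyword, domain in mapping.items():
--         if keyword in lower_text and domain not in domains:
--             domains.append(domain)
--     if not domains:
--         domains.append("General compliance review required")
--     return domains
-- ===== SOURCE B (Python) =====
-- GROUPS = [
--     ("Governance & Oversight", ["governance", "board"]),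
--     ("Fiduciary Duties & Financial Integrity", ["fiduciary", "treasury", "capital"]),
--     ("Data Protection & Privacy Operations", ["privacy", "data", "gdpr"]),
--     ("Cross-Border & Jurisdictional Alignment", ["cross-border", "international", "sanctions", "jurisdiction"]),
-- ]
--
-- def infer_domains(text: str) -> list[str]:
--     lower_text = text.lower()
--     hits = [label for label, kws in GROUPS if any(kw in lower_text for kw in kws)]
--     return hits or ["General compliance review required"]
-- ===== Notes on version B (the rewrite author's own statement) =====
-- stated objective: simpler
-- what changed: Replaces the flat keyword-to-domain dict plus dedup-guarded accumulation loop with a grouped domain-to-keywords table scanned once per domain via any(), making the duplicate-membership guard unnecessary.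
import Mathlib
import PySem

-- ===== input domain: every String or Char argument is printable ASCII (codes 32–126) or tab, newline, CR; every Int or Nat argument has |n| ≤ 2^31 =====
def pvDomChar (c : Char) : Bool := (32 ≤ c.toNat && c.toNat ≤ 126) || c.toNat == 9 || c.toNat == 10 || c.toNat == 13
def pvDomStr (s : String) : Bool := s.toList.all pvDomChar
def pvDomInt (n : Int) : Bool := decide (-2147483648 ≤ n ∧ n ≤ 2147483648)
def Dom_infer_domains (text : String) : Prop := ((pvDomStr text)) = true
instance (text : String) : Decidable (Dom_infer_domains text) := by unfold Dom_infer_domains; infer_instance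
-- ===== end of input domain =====

-- B replaces A's flat keyword→domain dict and dedup-guarded loop by a grouped
-- domain→keywords table scanned once per domain (objective: simpler).

-- ===== PORT A =====
def infer_domains (text : String) : List String :=
  let lower_text := PySem.Str.lower text
  -- the dict literal has 12 distinct keys, so its items are exactly this list in order
  let mapping : List (String × String) :=
    [("governance", "Governance & Oversight"),
     ("board", "Governance & Oversight"),
     ("fiduciary", "Fiduciary Duties & Financial Integrity"),
     ("treasury", "Fiduciary Duties & Financial Integrity"),
     ("capital", "Fiduciary Duties & Financial Integrity"),
     ("privacy", "Data Protection & Privacy Operations"),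
     ("data", "Data Protection & Privacy Operations"),
     ("gdpr", "Data Protection & Privacy Operations"),
     ("cross-border", "Cross-Border & Jurisdictional Alignment"),
     ("international", "Cross-Border & Jurisdictional Alignment"),
     ("sanctions", "Cross-Border & Jurisdictional Alignment"),
     ("jurisdiction", "Cross-Border & Jurisdictional Alignment")]
  let domains := mapping.foldl
    (fun domains kd =>
      if PySem.Str.isIn kd.1 lower_text = true ∧ kd.2 ∉ domains then domains ++ [kd.2]
      else domains) []
  if domains = [] then ["General compliance review required"] else domains

-- ===== PORT B =====
def inferDomainGroups : List (String × List String) :=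
  [("Governance & Oversight", ["governance", "board"]),
   ("Fiduciary Duties & Financial Integrity", ["fiduciary", "treasury", "capital"]),
   ("Data Protection & Privacy Operations", ["privacy", "data", "gdpr"]),
   ("Cross-Border & Jurisdictional Alignment",
    ["cross-border", "international", "sanctions", "jurisdiction"])]

def infer_domains_alt (text : String) : List String :=
  let lower_text := PySem.Str.lower text
  let hits :=
    (inferDomainGroups.filter
      (fun g => g.2.any (fun kw => PySem.Str.isIn kw lower_text))).map Prod.fst
  if hits = [] then ["General compliance review required"] else hits

-- ===== PRECONDITION & SPEC =====
def Spec_infer_domains (text : String) (out : List String) : Prop := out = infer_domains_alt text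
instance (text : String) (out : List String) : Decidable (Spec_infer_domains text out) := by unfold Spec_infer_domains; infer_instance

-- ===== CLAIM (what is proved, stated in full; the proofs are below) =====
def Claim_equal_infer_domains : Prop := ∀ (text : String), Dom_infer_domains text → Spec_infer_domains text (infer_domains text)

-- ===== LEMMAS AND PROOFS =====
theorem infer_fold_mem (lt d : String) (kws : List String) (acc : List String)
    (h : d ∈ acc) :
    (kws.map (fun k => (k, d))).foldl
      (fun domains kd =>
        if PySem.Str.isIn kd.1 lt = true ∧ kd.2 ∉ domains then domains ++ [kd.2]
        else domains) acc = acc := by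
  induction kws with
  | nil => rfl
  | cons k rest ih =>
    simp only [List.map, List.foldl]
    rw [if_neg (fun hc => hc.2 h), ih]

theorem infer_fold_seg (lt d : String) (kws : List String) (acc : List String)
    (h : d ∉ acc) :
    (kws.map (fun k => (k, d))).foldl
      (fun domains kd =>
        if PySem.Str.isIn kd.1 lt = true ∧ kd.2 ∉ domains then domains ++ [kd.2]
        else domains) acc
      = acc ++ (if kws.any (fun kw => PySem.Str.isIn kw lt) then [d] else []) := by
  induction kws with
  | nil => simp
  | cons k rest ih =>
    simp only [List.map, List.foldl, List.any_cons]
    by_cases hk : PySem.Str.isIn k lt = true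
    · rw [if_pos ⟨hk, h⟩, infer_fold_mem lt d rest _ (by simp)]
      simp only [hk, Bool.true_or, if_pos]
    · rw [Bool.not_eq_true] at hk
      rw [if_neg (fun hc => (by simp only [PySem.Str.isIn_eq] at hk; simp [hk] at hc : False)), ih]
      simp only [hk, Bool.false_or]

theorem infer_domains_eq_alt (text : String) :
    infer_domains text = infer_domains_alt text := by
  unfold infer_domains infer_domains_alt inferDomainGroups
  dsimp only
  generalize PySem.Str.lower text = lt
  rw [show [("governance", "Governance & Oversight"),
     ("board", "Governance & Oversight"),
     ("fiduciary", "Fiduciary Duties & Financial Integrity"),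
     ("treasury", "Fiduciary Duties & Financial Integrity"),
     ("capital", "Fiduciary Duties & Financial Integrity"),
     ("privacy", "Data Protection & Privacy Operations"),
     ("data", "Data Protection & Privacy Operations"),
     ("gdpr", "Data Protection & Privacy Operations"),
     ("cross-border", "Cross-Border & Jurisdictional Alignment"),
     ("international", "Cross-Border & Jurisdictional Alignment"),
     ("sanctions", "Cross-Border & Jurisdictional Alignment"),
     ("jurisdiction", "Cross-Border & Jurisdictional Alignment")]
     = (["governance", "board"].map (fun k => (k, "Governance & Oversight")))
       ++ (["fiduciary", "treasury", "capital"].map (fun k => (k, "Fiduciary Duties & Financial Integrity")))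
       ++ (["privacy", "data", "gdpr"].map (fun k => (k, "Data Protection & Privacy Operations")))
       ++ (["cross-border", "international", "sanctions", "jurisdiction"].map
             (fun k => (k, "Cross-Border & Jurisdictional Alignment"))) from rfl,
     List.foldl_append, List.foldl_append, List.foldl_append,
     infer_fold_seg lt "Governance & Oversight" ["governance", "board"] [] (by simp),
     infer_fold_seg lt "Fiduciary Duties & Financial Integrity" ["fiduciary", "treasury", "capital"]
       ([] ++ (if ["governance", "board"].any (fun kw => PySem.Str.isIn kw lt) then
          ["Governance & Oversight"] else [])) (by split_ifs <;> simp),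
     infer_fold_seg lt "Data Protection & Privacy Operations" ["privacy", "data", "gdpr"]
       (([] ++ (if ["governance", "board"].any (fun kw => PySem.Str.isIn kw lt) then
          ["Governance & Oversight"] else []))
        ++ (if ["fiduciary", "treasury", "capital"].any (fun kw => PySem.Str.isIn kw lt) then
          ["Fiduciary Duties & Financial Integrity"] else [])) (by split_ifs <;> simp),
     infer_fold_seg lt "Cross-Border & Jurisdictional Alignment"
       ["cross-border", "international", "sanctions", "jurisdiction"]
       ((([] ++ (if ["governance", "board"].any (fun kw => PySem.Str.isIn kw lt) then
          ["Governance & Oversight"] else []))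
        ++ (if ["fiduciary", "treasury", "capital"].any (fun kw => PySem.Str.isIn kw lt) then
          ["Fiduciary Duties & Financial Integrity"] else []))
        ++ (if ["privacy", "data", "gdpr"].any (fun kw => PySem.Str.isIn kw lt) then
          ["Data Protection & Privacy Operations"] else [])) (by split_ifs <;> simp)]
  cases hc1 : ["governance", "board"].any (fun kw => PySem.Str.isIn kw lt) <;>
  cases hc2 : ["fiduciary", "treasury", "capital"].any (fun kw => PySem.Str.isIn kw lt) <;>
  cases hc3 : ["privacy", "data", "gdpr"].any (fun kw => PySem.Str.isIn kw lt) <;>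
  cases hc4 : ["cross-border", "international", "sanctions", "jurisdiction"].any
      (fun kw => PySem.Str.isIn kw lt) <;>
  simp only [List.filter, List.map, hc1, hc2, hc3, hc4] <;> rfl

-- ===== VERDICT (by name: the statement is the Claim_ definition above) =====
theorem infer_domains_spec : Claim_equal_infer_domains := by
  intro text _
  exact infer_domains_eq_alt text
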